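-- pv_equiv track=rewrite | github.com/YamalSharma/inestment-research-agent | agents/report_agent.py | _generate_comparative_summary
-- ===== SOURCE A (Python) =====
-- from typing import Dict, Any, List
--
-- def _generate_comparative_summary(stock_reports: List[Dict[str, Any]]) -> str:
--     """Generate summary for comparative analysis."""
--     total_stocks = len(stock_reports)
--
--     buy_count = sum(
--         1
--         for r in stock_reports
--         if "Buy" in r.get("recommendation", {}).get("action", "")
--     )
--     hold_count = sum(
--         1
--         for r in stock_reports
--         if "Hold" in r.get("recommendation", {}).get("action", "")
--     )
--     sell_count = sum(
--         1
--         for r in stock_reports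
--         if "Sell" in r.get("recommendation", {}).get("action", "")
--     )
--
--     summary = (
--         f"Analyzed {total_stocks} stocks. "
--         f"Recommendations: {buy_count} Buy, {hold_count} Hold, {sell_count} Sell."
--     )
--
--     return summary
-- ===== SOURCE B (Python) =====
-- def _generate_comparative_summary(stock_reports):
--     """Generate summary for comparative analysis (map to indicator rows, transpose, sum columns)."""
--     keywords = ("Buy", "Hold", "Sell")
--     rows = [
--         tuple(kw in r.get("recommendation", {}).get("action", "") for kw in keywords)
--         for r in stock_reports
--     ]
--     counts = [sum(col) for col in zip(*rows)] or [0, 0, 0]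
--     return (
--         f"Analyzed {len(stock_reports)} stocks. "
--         f"Recommendations: {counts[0]} Buy, {counts[1]} Hold, {counts[2]} Sell."
--     )
-- ===== Notes on version B (the rewrite author's own statement) =====
-- stated objective: alternative
-- what changed: Instead of three conditional counting scans, B maps each report to a boolean indicator row over the keyword table, transposes with zip, and obtains each count as the sum of a boolean column.
import Mathlib
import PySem

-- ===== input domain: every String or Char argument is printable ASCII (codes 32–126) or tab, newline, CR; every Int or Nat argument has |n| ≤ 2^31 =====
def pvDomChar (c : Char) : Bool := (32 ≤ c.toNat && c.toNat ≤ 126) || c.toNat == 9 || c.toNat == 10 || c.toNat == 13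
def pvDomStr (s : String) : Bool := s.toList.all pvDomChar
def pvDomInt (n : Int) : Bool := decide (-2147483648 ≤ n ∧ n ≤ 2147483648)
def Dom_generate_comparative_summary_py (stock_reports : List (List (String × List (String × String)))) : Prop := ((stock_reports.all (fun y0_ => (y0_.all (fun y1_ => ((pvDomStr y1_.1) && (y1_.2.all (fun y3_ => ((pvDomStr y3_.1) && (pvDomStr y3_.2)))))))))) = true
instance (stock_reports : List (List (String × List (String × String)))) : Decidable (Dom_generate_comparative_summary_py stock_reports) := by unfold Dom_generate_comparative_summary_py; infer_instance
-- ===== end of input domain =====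

-- B maps each report to a boolean indicator row, transposes, and sums the columns (objective: alternative).

-- r.get("recommendation", {}).get("action", "") — the same nested first-match lookup both Pythons perform
def pvAction (r : List (String × List (String × String))) : String :=
  (PySem.Dict.mk ((PySem.Dict.mk r).getD "recommendation" [])).getD "action" ""

-- ===== PORT A =====
def generate_comparative_summary_py (stock_reports : List (List (String × List (String × String)))) : String :=
  let total_stocks : Int := stock_reports.length
  let buy_count : Int := stock_reports.foldl
    (fun acc r => if PySem.Str.isIn "Buy" (pvAction r) then acc + 1 else acc) 0
  let hold_count : Int := stock_reports.foldl
    (fun acc r => if PySem.Str.isIn "Hold" (pvAction r) then acc + 1 else acc) 0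
  let sell_count : Int := stock_reports.foldl
    (fun acc r => if PySem.Str.isIn "Sell" (pvAction r) then acc + 1 else acc) 0
  "Analyzed " ++ PySem.Int.toStr total_stocks ++ " stocks. Recommendations: " ++
    PySem.Int.toStr buy_count ++ " Buy, " ++ PySem.Int.toStr hold_count ++ " Hold, " ++
    PySem.Int.toStr sell_count ++ " Sell."

-- ===== PORT B =====
-- one indicator row per report: (kw in action for kw in ("Buy","Hold","Sell"))
def pvRow (r : List (String × List (String × String))) : Bool × Bool × Bool :=
  let action := pvAction r
  (PySem.Str.isIn "Buy" action, PySem.Str.isIn "Hold" action, PySem.Str.isIn "Sell" action)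

-- sum(col): Python sums a column of bools to an int
def pvColSum (col : List Bool) : Int :=
  col.foldl (fun a b => a + (if b then 1 else 0)) 0

def generate_comparative_summary_py_alt (stock_reports : List (List (String × List (String × String)))) : String :=
  let rows := stock_reports.map pvRow
  -- [sum(col) for col in zip(*rows)] or [0, 0, 0]: zip(*rows) is the three columns when rows ≠ []
  let counts : Int × Int × Int :=
    if rows = [] then (0, 0, 0)
    else (pvColSum (rows.map (·.1)), pvColSum (rows.map (·.2.1)), pvColSum (rows.map (·.2.2)))
  "Analyzed " ++ PySem.Int.toStr (stock_reports.length : Int) ++ " stocks. Recommendations: " ++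
    PySem.Int.toStr counts.1 ++ " Buy, " ++ PySem.Int.toStr counts.2.1 ++ " Hold, " ++
    PySem.Int.toStr counts.2.2 ++ " Sell."

-- ===== PRECONDITION & SPEC =====
def Spec_generate_comparative_summary_py (stock_reports : List (List (String × List (String × String)))) (out : String) : Prop := out = generate_comparative_summary_py_alt stock_reports
instance (stock_reports : List (List (String × List (String × String)))) (out : String) : Decidable (Spec_generate_comparative_summary_py stock_reports out) := by unfold Spec_generate_comparative_summary_py; infer_instance

-- ===== CLAIM (what is proved, stated in full; the proofs are below) =====
def Claim_equal_generate_comparative_summary_py : Prop := ∀ (stock_reports : List (List (String × List (String × String)))), Dom_generate_comparative_summary_py stock_reports → Spec_generate_comparative_summary_py stock_reports (generate_comparative_summary_py stock_reports)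

-- ===== LEMMAS AND PROOFS =====

-- A's conditional counting fold equals B's column sum of the mapped indicator bits
lemma count_eq_colSum {α : Type} (f : α → Bool) (l : List α) :
    ∀ a : Int, l.foldl (fun acc x => if f x then acc + 1 else acc) a =
      (l.map f).foldl (fun acc b => acc + (if b then 1 else 0)) a := by
  induction l with
  | nil => intro a; rfl
  | cons x t ih =>
    intro a
    simp only [List.map_cons, List.foldl_cons]
    rw [ih]
    split <;> simp

-- ===== VERDICT (by name: the statement is the Claim_ definition above) =====
theorem generate_comparative_summary_py_spec : Claim_equal_generate_comparative_summary_py := by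
  intro sr _
  unfold Spec_generate_comparative_summary_py generate_comparative_summary_py
    generate_comparative_summary_py_alt pvColSum
  cases sr with
  | nil => rfl
  | cons r t =>
    simp only [List.map_cons, List.map_map, if_neg (List.cons_ne_nil _ _)]
    rw [count_eq_colSum (fun r => PySem.Str.isIn "Buy" (pvAction r)),
        count_eq_colSum (fun r => PySem.Str.isIn "Hold" (pvAction r)),
        count_eq_colSum (fun r => PySem.Str.isIn "Sell" (pvAction r))]
    simp [Function.comp_def, pvRow]
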